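-- pv_equiv track=rewrite | github.com/Herchan321/python_projects | VLSM.py | nombre_bits_necessaires
-- ===== SOURCE A (Python) =====
-- def nombre_bits_necessaires(besoins):
--     resultats = []
--     for besoin in besoins:
--         if besoin >= 2 and besoin <= 4:
--             resultats.append(2)
--         elif besoin > 4 and besoin <= 8:
--             resultats.append(3)
--         elif besoin > 8 and besoin <= 16:
--             resultats.append(4)
--         elif besoin > 16 and besoin <= 32:
--             resultats.append(5)
--         elif besoin > 32 and besoin <= 64:
--             resultats.append(6)
--         elif besoin > 64 and besoin <= 128:
--             resultats.append(7)
--         else: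
--             resultats.append(8)
--
--     return resultats
-- ===== SOURCE B (Python) =====
-- def _bits(b):
--     # ceil(log2(b)) via bit_length, floored at 2; out-of-range needs get 8
--     if 2 <= b <= 128:
--         return max(2, (b - 1).bit_length())
--     return 8
--
-- def nombre_bits_necessaires(besoins):
--     return [_bits(b) for b in besoins]
-- ===== Notes on version B (the rewrite author's own statement) =====
-- stated objective: alternative
-- what changed: Replaces the six-branch comparison ladder by a closed-form arithmetic computation: bits = max(2, (besoin-1).bit_length()) for 2 <= besoin <= 128, else 8, applied elementwise via a list comprehension.
import Mathlib
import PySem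

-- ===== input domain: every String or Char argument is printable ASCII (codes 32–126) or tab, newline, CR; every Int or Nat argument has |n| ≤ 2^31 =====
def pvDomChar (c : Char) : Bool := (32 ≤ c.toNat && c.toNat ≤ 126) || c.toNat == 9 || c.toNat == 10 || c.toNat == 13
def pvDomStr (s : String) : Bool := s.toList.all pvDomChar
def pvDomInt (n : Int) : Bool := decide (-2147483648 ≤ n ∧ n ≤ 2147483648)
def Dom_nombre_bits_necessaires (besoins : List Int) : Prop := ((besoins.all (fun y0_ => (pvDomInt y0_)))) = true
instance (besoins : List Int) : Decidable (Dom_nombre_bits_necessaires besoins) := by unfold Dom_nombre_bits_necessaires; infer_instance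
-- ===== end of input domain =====

-- B replaces A's six-branch comparison ladder by a closed-form arithmetic rule
-- (bits = max 2 (bit_length (besoin-1)) on [2,128], else 8), applied elementwise (objective: alternative).

-- ===== PORT A =====
def nombre_bits_necessaires (besoins : List Int) : List Int :=
  besoins.foldl (fun resultats besoin =>
    if besoin ≥ 2 ∧ besoin ≤ 4 then resultats ++ [2]
    else if besoin > 4 ∧ besoin ≤ 8 then resultats ++ [3]
    else if besoin > 8 ∧ besoin ≤ 16 then resultats ++ [4]
    else if besoin > 16 ∧ besoin ≤ 32 then resultats ++ [5]
    else if besoin > 32 ∧ besoin ≤ 64 then resultats ++ [6]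
    else if besoin > 64 ∧ besoin ≤ 128 then resultats ++ [7]
    else resultats ++ [8]) []

-- ===== PORT B =====
-- Python's (nonnegative) int.bit_length
def pvBitLength (n : Nat) : Nat :=
  if n = 0 then 0 else pvBitLength (n / 2) + 1
decreasing_by exact Nat.div_lt_self (Nat.pos_of_ne_zero (by assumption)) (by omega)

def pvBits (b : Int) : Int :=
  if 2 ≤ b ∧ b ≤ 128 then max 2 ((pvBitLength (b - 1).toNat : Int)) else 8

def nombre_bits_necessaires_alt (besoins : List Int) : List Int :=
  besoins.map pvBits

-- ===== PRECONDITION & SPEC =====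
def Spec_nombre_bits_necessaires (besoins : List Int) (out : List Int) : Prop := out = nombre_bits_necessaires_alt besoins
instance (besoins : List Int) (out : List Int) : Decidable (Spec_nombre_bits_necessaires besoins out) := by unfold Spec_nombre_bits_necessaires; infer_instance

-- ===== CLAIM (what is proved, stated in full; the proofs are below) =====
def Claim_equal_nombre_bits_necessaires : Prop := ∀ (besoins : List Int), Dom_nombre_bits_necessaires besoins → Spec_nombre_bits_necessaires besoins (nombre_bits_necessaires besoins)

-- ===== LEMMAS AND PROOFS =====
theorem pvBL_zero : pvBitLength 0 = 0 := by rw [pvBitLength]; simp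

theorem pvBL_succ (n : Nat) (h : n ≠ 0) : pvBitLength n = pvBitLength (n / 2) + 1 := by
  rw [pvBitLength]; simp [h]

theorem pvBL_pow (k : Nat) : ∀ n : Nat, 2 ^ k ≤ n → n < 2 ^ (k + 1) → pvBitLength n = k + 1 := by
  induction k with
  | zero =>
    intro n h1 h2
    have hn : n = 1 := by omega
    subst hn
    rw [pvBL_succ 1 one_ne_zero]
    norm_num [pvBL_zero]
  | succ k ih =>
    intro n h1 h2
    have hp : 1 ≤ 2 ^ k := Nat.one_le_two_pow
    rw [pow_succ] at h1
    rw [pow_succ, pow_succ] at h2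
    have hn : n ≠ 0 := by omega
    rw [pvBL_succ n hn, ih (n / 2) (by omega) (by rw [pow_succ]; omega)]

theorem pvBits_of_pow (j : Nat) (b : Int) (hj2 : 2 ≤ j) (hj7 : j ≤ 7)
    (hlo : (2 : Int) ^ (j - 1) < b) (hhi : b ≤ (2 : Int) ^ j) : pvBits b = (j : Int) := by
  have hjj : j - 1 + 1 = j := by omega
  have hQ : (2 : Int) ^ j = 2 ^ (j - 1) * 2 := by rw [← pow_succ, hjj]
  have hP1 : (2 : Int) ≤ 2 ^ (j - 1) := by
    calc (2 : Int) = 2 ^ 1 := by norm_num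
    _ ≤ 2 ^ (j - 1) := by apply pow_le_pow_right₀ (by norm_num) (by omega)
  have h128 : (2 : Int) ^ j ≤ 128 := by
    calc (2 : Int) ^ j ≤ 2 ^ 7 := by apply pow_le_pow_right₀ (by norm_num) hj7
    _ = 128 := by norm_num
  have hguard : 2 ≤ b ∧ b ≤ 128 := by constructor <;> omega
  unfold pvBits
  rw [if_pos hguard]
  have hm : ((b - 1).toNat : Int) = b - 1 := Int.toNat_of_nonneg (by omega)
  have hmlo : 2 ^ (j - 1) ≤ (b - 1).toNat := by
    have : ((2 ^ (j - 1) : Nat) : Int) ≤ ((b - 1).toNat : Int) := by push_cast; omega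
    exact_mod_cast this
  have hmhi : (b - 1).toNat < 2 ^ (j - 1 + 1) := by
    have : ((b - 1).toNat : Int) < ((2 ^ (j - 1 + 1) : Nat) : Int) := by
      push_cast; rw [hjj]; omega
    exact_mod_cast this
  rw [pvBL_pow (j - 1) _ hmlo hmhi, hjj]
  have : (2 : Int) ≤ (j : Int) := by exact_mod_cast hj2
  omega

theorem pv_elem_eq (b : Int) :
    (if b ≥ 2 ∧ b ≤ 4 then ([2] : List Int)
     else if b > 4 ∧ b ≤ 8 then [3]
     else if b > 8 ∧ b ≤ 16 then [4]
     else if b > 16 ∧ b ≤ 32 then [5]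
     else if b > 32 ∧ b ≤ 64 then [6]
     else if b > 64 ∧ b ≤ 128 then [7]
     else [8]) = [pvBits b] := by
  split_ifs with h1 h2 h3 h4 h5 h6
  · by_cases hb : b = 2
    · subst hb
      have hbl1 : pvBitLength 1 = 1 := by rw [pvBL_succ 1 one_ne_zero, pvBL_zero]
      unfold pvBits
      norm_num [hbl1]
    · rw [show (2 : Int) = ((2 : Nat) : Int) from rfl,
        pvBits_of_pow 2 b (by norm_num) (by norm_num) (by norm_num; omega) (by norm_num; omega)]
  · rw [show (3 : Int) = ((3 : Nat) : Int) from rfl,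
      pvBits_of_pow 3 b (by norm_num) (by norm_num) (by norm_num; omega) (by norm_num; omega)]
  · rw [show (4 : Int) = ((4 : Nat) : Int) from rfl,
      pvBits_of_pow 4 b (by norm_num) (by norm_num) (by norm_num; omega) (by norm_num; omega)]
  · rw [show (5 : Int) = ((5 : Nat) : Int) from rfl,
      pvBits_of_pow 5 b (by norm_num) (by norm_num) (by norm_num; omega) (by norm_num; omega)]
  · rw [show (6 : Int) = ((6 : Nat) : Int) from rfl,
      pvBits_of_pow 6 b (by norm_num) (by norm_num) (by norm_num; omega) (by norm_num; omega)]
  · rw [show (7 : Int) = ((7 : Nat) : Int) from rfl,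
      pvBits_of_pow 7 b (by norm_num) (by norm_num) (by norm_num; omega) (by norm_num; omega)]
  · unfold pvBits
    rw [if_neg (by omega)]

theorem pv_foldl_map (besoins : List Int) (acc : List Int) :
    besoins.foldl (fun resultats besoin =>
      if besoin ≥ 2 ∧ besoin ≤ 4 then resultats ++ [2]
      else if besoin > 4 ∧ besoin ≤ 8 then resultats ++ [3]
      else if besoin > 8 ∧ besoin ≤ 16 then resultats ++ [4]
      else if besoin > 16 ∧ besoin ≤ 32 then resultats ++ [5]
      else if besoin > 32 ∧ besoin ≤ 64 then resultats ++ [6]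
      else if besoin > 64 ∧ besoin ≤ 128 then resultats ++ [7]
      else resultats ++ [8]) acc
    = acc ++ besoins.map pvBits := by
  induction besoins generalizing acc with
  | nil => simp
  | cons b bs ih =>
    simp only [List.foldl, List.map]
    have hstep : (if b ≥ 2 ∧ b ≤ 4 then acc ++ [2]
      else if b > 4 ∧ b ≤ 8 then acc ++ [3]
      else if b > 8 ∧ b ≤ 16 then acc ++ [4]
      else if b > 16 ∧ b ≤ 32 then acc ++ [5]
      else if b > 32 ∧ b ≤ 64 then acc ++ [6]
      else if b > 64 ∧ b ≤ 128 then acc ++ [7]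
      else acc ++ [8]) = acc ++ [pvBits b] := by
      rw [← pv_elem_eq b]; split_ifs <;> rfl
    rw [hstep, ih]
    simp

-- ===== VERDICT (by name: the statement is the Claim_ definition above) =====
theorem nombre_bits_necessaires_spec : Claim_equal_nombre_bits_necessaires := by
  intro besoins _
  unfold Spec_nombre_bits_necessaires nombre_bits_necessaires nombre_bits_necessaires_alt
  simpa using pv_foldl_map besoins []
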